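-- pv_equiv track=rewrite | github.com/daniel-reich/ubiquitous-fiesta | 8NyNftbNXd6CZCDXf_15.py | get_coin_balances
-- ===== SOURCE A (Python) =====
-- def get_coin_balances(lst1, lst2):
--   p1, p2 = 3, 3
--   for m1, m2 in zip(lst1, lst2):
--     if (m1, m2) == ('share', 'share'):
--       p1 += 2
--       p2 += 2
--     elif (m1, m2) == ('share', 'steal'):
--       p1 -= 1
--       p2 += 3
--     elif (m1, m2) == ('steal', 'share'):
--       p1 += 3
--       p2 -= 1
--   return [p1, p2]
-- ===== SOURCE B (Python) =====
-- def get_coin_balances(lst1, lst2):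
--   cnt = {}
--   for pair in zip(lst1, lst2):
--     cnt[pair] = cnt.get(pair, 0) + 1
--   ss = cnt.get(('share', 'share'), 0)
--   st = cnt.get(('share', 'steal'), 0)
--   ts = cnt.get(('steal', 'share'), 0)
--   return [3 + 2 * ss - st + 3 * ts, 3 + 2 * ss + 3 * st - ts]
-- ===== Notes on version B (the rewrite author's own statement) =====
-- stated objective: simpler
-- what changed: Replaces the incremental branch-accumulation loop over both balances with a tally-then-score decomposition: count occurrences of each move pair once, then compute both balances in one closed-form arithmetic step.
import Mathlib
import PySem

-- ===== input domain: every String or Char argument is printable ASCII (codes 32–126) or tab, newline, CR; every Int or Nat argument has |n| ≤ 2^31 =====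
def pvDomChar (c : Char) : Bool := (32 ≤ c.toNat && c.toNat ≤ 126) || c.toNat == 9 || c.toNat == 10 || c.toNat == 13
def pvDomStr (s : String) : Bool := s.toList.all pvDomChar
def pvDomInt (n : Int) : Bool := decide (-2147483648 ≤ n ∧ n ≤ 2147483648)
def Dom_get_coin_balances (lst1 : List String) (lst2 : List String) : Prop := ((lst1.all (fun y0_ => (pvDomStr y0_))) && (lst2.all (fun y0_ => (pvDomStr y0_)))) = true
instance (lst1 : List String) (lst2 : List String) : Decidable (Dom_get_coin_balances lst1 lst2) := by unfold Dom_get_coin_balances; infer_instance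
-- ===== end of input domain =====

-- B replaces A's incremental branch-accumulation loop with a tally-then-score
-- decomposition (count each move pair once, then score in closed form); objective: simpler.

-- ===== PORT A =====
def get_coin_balances (lst1 : List String) (lst2 : List String) : List Int :=
  let s := (lst1.zip lst2).foldl
    (fun (s : Int × Int) mm =>
      if mm = ("share", "share") then (s.1 + 2, s.2 + 2)
      else if mm = ("share", "steal") then (s.1 - 1, s.2 + 3)
      else if mm = ("steal", "share") then (s.1 + 3, s.2 - 1)
      else s) (3, 3)
  [s.1, s.2]

-- ===== PORT B =====
def get_coin_balances_alt (lst1 : List String) (lst2 : List String) : List Int :=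
  let cnt : PySem.Dict (String × String) Int :=
    (lst1.zip lst2).foldl (fun d pair => d.insert pair (d.getD pair 0 + 1)) PySem.Dict.empty
  let ss := cnt.getD ("share", "share") 0
  let st := cnt.getD ("share", "steal") 0
  let ts := cnt.getD ("steal", "share") 0
  [3 + 2 * ss - st + 3 * ts, 3 + 2 * ss + 3 * st - ts]

-- ===== PRECONDITION & SPEC =====
def Spec_get_coin_balances (lst1 : List String) (lst2 : List String) (out : List Int) : Prop := out = get_coin_balances_alt lst1 lst2
instance (lst1 : List String) (lst2 : List String) (out : List Int) : Decidable (Spec_get_coin_balances lst1 lst2 out) := by unfold Spec_get_coin_balances; infer_instance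

-- ===== CLAIM (what is proved, stated in full; the proofs are below) =====
def Claim_equal_get_coin_balances : Prop := ∀ (lst1 : List String) (lst2 : List String), Dom_get_coin_balances lst1 lst2 → Spec_get_coin_balances lst1 lst2 (get_coin_balances lst1 lst2)

-- ===== LEMMAS AND PROOFS =====

-- getD after the counting fold = old value + number of occurrences
theorem pv_getD_count_fold (l : List (String × String))
    (d : PySem.Dict (String × String) Int) (k : String × String) :
    ((l.foldl (fun d pair => d.insert pair (d.getD pair 0 + 1)) d).getD k 0)
      = d.getD k 0 + l.count k := by
  induction l generalizing d with
  | nil => simp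
  | cons a l ih =>
    simp only [List.foldl_cons, ih, List.count_cons, PySem.Dict.getD_insert]
    by_cases h : k = a
    · simp [h]; ring
    · simp [h]; exact fun e => h e.symm

-- A's fold in closed form: both balances from the three pair counts
theorem pv_foldA_closed (l : List (String × String)) (p1 p2 : Int) :
    (l.foldl
      (fun (s : Int × Int) mm =>
        if mm = ("share", "share") then (s.1 + 2, s.2 + 2)
        else if mm = ("share", "steal") then (s.1 - 1, s.2 + 3)
        else if mm = ("steal", "share") then (s.1 + 3, s.2 - 1)
        else s) (p1, p2))
    = (p1 + 2 * l.count ("share", "share") - l.count ("share", "steal")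
          + 3 * l.count ("steal", "share"),
       p2 + 2 * l.count ("share", "share") + 3 * l.count ("share", "steal")
          - l.count ("steal", "share")) := by
  induction l generalizing p1 p2 with
  | nil => simp
  | cons a l ih =>
    simp only [List.foldl_cons, List.count_cons]
    by_cases h1 : a = ("share", "share")
    · simp [h1, ih]; constructor <;> ring
    · by_cases h2 : a = ("share", "steal")
      · simp [h2, ih]; constructor <;> ring
      · by_cases h3 : a = ("steal", "share")
        · simp [h3, ih]; constructor <;> ring
        · simp [ih, h1, h2, h3]

-- ===== VERDICT (by name: the statement is the Claim_ definition above) =====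
theorem get_coin_balances_spec : Claim_equal_get_coin_balances := by
  intro lst1 lst2 _
  unfold Spec_get_coin_balances get_coin_balances get_coin_balances_alt
  simp [pv_foldA_closed, pv_getD_count_fold]
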